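-- pv_equiv track=rewrite | github.com/damien75/Training-Algos | HackerRank/Dynamic Programming/palindromSubsequences.py | play_with_words
-- ===== SOURCE A (Python) =====
-- def play_with_words(s: str) -> int:
--     n = len(s)
--     l = [[0 for _ in range(n)] for _ in range(n)]
--     for i in range(n):
--         l[i][i] = 1
--     for cl in range(2, n+1):
--         for i in range(n-cl+1):
--             j = i+cl-1
--             if s[i] == s[j] and cl == 2:
--                 l[i][j] = 2
--             elif s[i] == s[j]:
--                 l[i][j] = l[i+1][j-1] + 2
--             else:
--                 l[i][j] = max(l[i][j-1], l[i+1][j])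
--
--     max_prod = 0
--     for i in range(1, n - 1):
--         max_prod = max(max_prod, l[0][i] * l[i + 1][n - 1])
--
--     return max_prod
-- ===== SOURCE B (Python) =====
-- def play_with_words(s: str) -> int:
--     # Top-down memoized recursion for the LPS recurrence instead of the bottom-up interval table.
--     n = len(s)
--     memo = {}
--
--     def lps(i, j):
--         if i > j:
--             return 0
--         if i == j:
--             return 1
--         if (i, j) in memo:
--             return memo[(i, j)]
--         if s[i] == s[j]:
--             res = 2 if j == i + 1 else lps(i + 1, j - 1) + 2
--         else:
--             res = max(lps(i, j - 1), lps(i + 1, j))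
--         memo[(i, j)] = res
--         return res
--
--     best = 0
--     for i in range(1, n - 1):
--         best = max(best, lps(0, i) * lps(i + 1, n - 1))
--     return best
-- ===== Notes on version B (the rewrite author's own statement) =====
-- stated objective: alternative
-- what changed: Replaces the bottom-up n-by-n interval DP table filled by increasing substring length with a top-down memoized recursion lps(i,j) that only evaluates the subproblems actually reached from the split products.
import Mathlib
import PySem

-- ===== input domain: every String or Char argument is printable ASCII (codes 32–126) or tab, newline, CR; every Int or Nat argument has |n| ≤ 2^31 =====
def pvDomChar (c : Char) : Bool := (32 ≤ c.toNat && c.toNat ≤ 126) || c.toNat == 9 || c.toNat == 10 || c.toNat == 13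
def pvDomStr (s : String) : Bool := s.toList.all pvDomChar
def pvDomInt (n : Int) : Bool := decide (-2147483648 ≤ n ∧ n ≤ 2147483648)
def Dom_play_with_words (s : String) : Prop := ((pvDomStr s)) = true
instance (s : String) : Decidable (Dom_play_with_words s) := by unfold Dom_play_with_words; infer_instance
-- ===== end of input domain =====

-- B replaces A's bottom-up interval DP table with a top-down memoized recursion (alternative
-- decomposition, same O(n^2) cost); the return value is proved identical on all strings.

-- ===== PORT A =====
-- s[i] for an index that A only ever uses in range (exact there; out of range Python would raise,
-- which A's loops never do)
def pvGet1 (cs : List Char) (i : Int) : Char := (PySem.List.pyGet? cs i).getD ' '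
-- l[i][j] read / write; all of A's indices come from range(...) and are nonnegative and in range,
-- so List.set / getD with .toNat is exact here
def pvGet2 (l : List (List Int)) (i j : Int) : Int :=
  (PySem.List.pyGet? ((PySem.List.pyGet? l i).getD []) j).getD 0
def pvSet2 (l : List (List Int)) (i j v : Int) : List (List Int) :=
  l.set i.toNat ((l.getD i.toNat []).set j.toNat v)

def play_with_words (s : String) : Int :=
  let cs := s.toList
  let n : Int := (cs.length : Int)
  let l0 : List (List Int) :=
    (PySem.List.pyRange 0 n 1).map (fun _ => (PySem.List.pyRange 0 n 1).map (fun _ => (0 : Int)))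
  let l1 := (PySem.List.pyRange 0 n 1).foldl (fun l i => pvSet2 l i i 1) l0
  let l2 := (PySem.List.pyRange 2 (n+1) 1).foldl (fun l cl =>
      (PySem.List.pyRange 0 (n - cl + 1) 1).foldl (fun l i =>
        let j := i + cl - 1
        if pvGet1 cs i = pvGet1 cs j ∧ cl = 2 then pvSet2 l i j 2
        else if pvGet1 cs i = pvGet1 cs j then pvSet2 l i j (pvGet2 l (i+1) (j-1) + 2)
        else pvSet2 l i j (max (pvGet2 l i (j-1)) (pvGet2 l (i+1) j))) l) l1
  (PySem.List.pyRange 1 (n-1) 1).foldl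
    (fun m i => max m (pvGet2 l2 0 i * pvGet2 l2 (i+1) (n-1))) 0

-- ===== PORT B =====
-- lps(i, j) of Source B: memo threaded explicitly (the Python closure mutates the dict)
def lpsB (cs : List Char) (i j : Int) (memo : PySem.Dict (Int × Int) Int) :
    Int × PySem.Dict (Int × Int) Int :=
  if i > j then (0, memo)
  else if i = j then (1, memo)
  else match memo.get? (i, j) with
    | some v => (v, memo)
    | none =>
      if pvGet1 cs i = pvGet1 cs j then
        if j = i + 1 then (2, memo.insert (i, j) 2)
        else
          let p := lpsB cs (i+1) (j-1) memo
          (p.1 + 2, p.2.insert (i, j) (p.1 + 2))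
      else
        let p1 := lpsB cs i (j-1) memo
        let p2 := lpsB cs (i+1) j p1.2
        (max p1.1 p2.1, p2.2.insert (i, j) (max p1.1 p2.1))
termination_by (j - i).toNat
decreasing_by all_goals omega

def play_with_words_alt (s : String) : Int :=
  let cs := s.toList
  let n : Int := (cs.length : Int)
  ((PySem.List.pyRange 1 (n-1) 1).foldl
    (fun acc i =>
      let p1 := lpsB cs 0 i acc.2
      let p2 := lpsB cs (i+1) (n-1) p1.2
      (max acc.1 (p1.1 * p2.1), p2.2))
    ((0 : Int), PySem.Dict.empty)).1

-- ===== PRECONDITION & SPEC =====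
def Spec_play_with_words (s : String) (out : Int) : Prop := out = play_with_words_alt s
instance (s : String) (out : Int) : Decidable (Spec_play_with_words s out) := by unfold Spec_play_with_words; infer_instance

-- ===== CLAIM (what is proved, stated in full; the proofs are below) =====
def Claim_equal_play_with_words : Prop := ∀ (s : String), Dom_play_with_words s → Spec_play_with_words s (play_with_words s)

-- ===== LEMMAS AND PROOFS =====

-- the pure LPS recurrence both ports compute
def lpsP (cs : List Char) (i j : Int) : Int :=
  if i > j then 0
  else if i = j then 1
  else if pvGet1 cs i = pvGet1 cs j then
    (if j = i + 1 then 2 else lpsP cs (i+1) (j-1) + 2)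
  else max (lpsP cs i (j-1)) (lpsP cs (i+1) j)
termination_by (j - i).toNat
decreasing_by all_goals omega

lemma lpsP_diag (cs : List Char) (i : Int) : lpsP cs i i = 1 := by
  rw [lpsP]; simp

lemma lpsP_lt (cs : List Char) (i j : Int) (h : i < j) :
    lpsP cs i j = if pvGet1 cs i = pvGet1 cs j then
      (if j = i + 1 then 2 else lpsP cs (i+1) (j-1) + 2)
    else max (lpsP cs i (j-1)) (lpsP cs (i+1) j) := by
  rw [lpsP]; rw [if_neg (by omega), if_neg (by omega)]

-- ---------- B side ----------

def MemoOK (cs : List Char) (m : PySem.Dict (Int × Int) Int) : Prop :=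
  ∀ p v, m.get? p = some v → v = lpsP cs p.1 p.2

lemma memoOK_empty (cs : List Char) : MemoOK cs PySem.Dict.empty := by
  intro p v h; simp [PySem.Dict.get?_empty] at h

lemma memoOK_insert (cs : List Char) (m : PySem.Dict (Int × Int) Int) (i j v : Int)
    (h : MemoOK cs m) (hv : v = lpsP cs i j) : MemoOK cs (m.insert (i, j) v) := by
  intro p w hw
  rw [PySem.Dict.get?_insert] at hw
  by_cases hp : p = (i, j)
  · subst hp; simp at hw; subst hw; simpa using hv
  · rw [if_neg hp] at hw; exact h p w hw

lemma lpsB_eq (cs : List Char) : ∀ (k : Nat) (i j : Int), (j - i).toNat ≤ k →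
    ∀ m, MemoOK cs m →
    (lpsB cs i j m).1 = lpsP cs i j ∧ MemoOK cs (lpsB cs i j m).2 := by
  intro k
  induction k with
  | zero =>
    intro i j hk m hm
    rw [lpsB]
    by_cases h1 : i > j
    · rw [if_pos h1, lpsP, if_pos h1]; exact ⟨rfl, hm⟩
    · have hij : i = j := by omega
      subst hij
      simp only [if_neg h1, if_pos rfl]
      exact ⟨(lpsP_diag cs i).symm, hm⟩
  | succ k ih =>
    intro i j hk m hm
    rw [lpsB]
    by_cases h1 : i > j
    · rw [if_pos h1, lpsP, if_pos h1]; exact ⟨rfl, hm⟩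
    rw [if_neg h1]
    by_cases h2 : i = j
    · subst h2; simp only [if_pos rfl]; exact ⟨(lpsP_diag cs i).symm, hm⟩
    rw [if_neg h2]
    have hij : i < j := by omega
    cases hget : m.get? (i, j) with
    | some v =>
      simp only []
      exact ⟨(hm (i, j) v hget).symm ▸ rfl, hm⟩
    | none =>
      simp only []
      by_cases hc : pvGet1 cs i = pvGet1 cs j
      · rw [if_pos hc]
        by_cases hj1 : j = i + 1
        · rw [if_pos hj1]
          refine ⟨?_, memoOK_insert cs m i j 2 hm ?_⟩ <;>
            rw [lpsP_lt cs i j hij, if_pos hc, if_pos hj1]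
        · rw [if_neg hj1]
          have hrec := ih (i+1) (j-1) (by omega) m hm
          refine ⟨?_, memoOK_insert cs _ i j _ hrec.2 ?_⟩ <;>
            simp only [hrec.1] <;>
            rw [lpsP_lt cs i j hij, if_pos hc, if_neg hj1]
      · rw [if_neg hc]
        have h3 := ih i (j-1) (by omega) m hm
        have h4 := ih (i+1) j (by omega) _ h3.2
        refine ⟨?_, memoOK_insert cs _ i j _ h4.2 ?_⟩ <;>
          simp only [h3.1, h4.1] <;>
          rw [lpsP_lt cs i j hij, if_neg hc]

lemma foldB_eq (cs : List Char) (n : Int) :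
    ∀ (L : List Int) (b0 : Int) (m0 : PySem.Dict (Int × Int) Int), MemoOK cs m0 →
    (L.foldl (fun acc i =>
        let p1 := lpsB cs 0 i acc.2
        let p2 := lpsB cs (i+1) (n-1) p1.2
        (max acc.1 (p1.1 * p2.1), p2.2)) (b0, m0)).1
    = L.foldl (fun b i => max b (lpsP cs 0 i * lpsP cs (i+1) (n-1))) b0 := by
  intro L
  induction L with
  | nil => intro b0 m0 _; rfl
  | cons x L ih =>
    intro b0 m0 hm
    have h1 := lpsB_eq cs (x - 0).toNat 0 x (le_refl _) m0 hm
    have h2 := lpsB_eq cs ((n-1) - (x+1)).toNat (x+1) (n-1) (le_refl _) _ h1.2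
    simp only [List.foldl_cons]
    rw [ih _ _ h2.2]
    simp only [h1.1, h2.1]

-- ---------- A side ----------

def ShapeN (n : Nat) (l : List (List Int)) : Prop :=
  l.length = n ∧ ∀ r ∈ l, r.length = n

lemma shape_pvSet2 (n : Nat) (l : List (List Int)) (i j v : Int)
    (h : ShapeN n l) (hi : 0 ≤ i) (hin : i < (n : Int)) : ShapeN n (pvSet2 l i j v) := by
  obtain ⟨h1, h2⟩ := h
  have hiN : i.toNat < l.length := by omega
  refine ⟨by simp [pvSet2, h1], ?_⟩
  intro r hr
  rcases List.mem_or_eq_of_mem_set hr with hmem | heq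
  · exact h2 r hmem
  · subst heq
    rw [List.length_set, List.getD_eq_getElem l [] hiN]
    exact h2 _ (List.getElem_mem hiN)

lemma pvGet2_nonneg (l : List (List Int)) (i j : Int) (hi : 0 ≤ i) (hj : 0 ≤ j) :
    pvGet2 l i j = (l.getD i.toNat []).getD j.toNat 0 := by
  unfold pvGet2
  rw [PySem.List.pyGet?_of_nonneg l hi, PySem.List.pyGet?_of_nonneg _ hj,
      List.getD_eq_getElem?_getD, List.getD_eq_getElem?_getD]

lemma pvGet2_pvSet2 (n : Nat) (l : List (List Int)) (a b i j v : Int)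
    (hsh : ShapeN n l)
    (ha : 0 ≤ a) (han : a < (n : Int)) (hb : 0 ≤ b) (hbn : b < (n : Int))
    (hi : 0 ≤ i) (hin : i < (n : Int)) (hj : 0 ≤ j) (hjn : j < (n : Int)) :
    pvGet2 (pvSet2 l a b v) i j = if i = a ∧ j = b then v else pvGet2 l i j := by
  obtain ⟨h1, h2⟩ := hsh
  have haN : a.toNat < l.length := by omega
  have hrow : (l.getD a.toNat []).length = n := by
    rw [List.getD_eq_getElem l [] haN]
    exact h2 _ (List.getElem_mem haN)
  rw [pvGet2_nonneg _ i j hi hj, pvGet2_nonneg l i j hi hj]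
  unfold pvSet2
  rw [List.getD_eq_getElem?_getD (l := l.set a.toNat ((l.getD a.toNat []).set b.toNat v))
        (i := i.toNat) (a := ([] : List Int)),
      List.getElem?_set]
  by_cases hia : a = i
  · rw [if_pos (by omega : a.toNat = i.toNat), if_pos haN]
    simp only [Option.getD_some]
    rw [List.getD_eq_getElem?_getD, List.getElem?_set]
    by_cases hjb : b = j
    · rw [if_pos (by omega : b.toNat = j.toNat), if_pos (by omega), if_pos ⟨hia.symm, hjb.symm⟩]
      simp
    · rw [if_neg (by omega : ¬ b.toNat = j.toNat), if_neg (by tauto),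
          ← List.getD_eq_getElem?_getD]
      congr 2
      omega
  · rw [if_neg (by omega : ¬ a.toNat = i.toNat), if_neg (by tauto),
        ← List.getD_eq_getElem?_getD]

def TblOK (cs : List Char) (c : Int) (l : List (List Int)) : Prop :=
  ShapeN cs.length l ∧
  ∀ i j : Int, 0 ≤ i → i ≤ j → j < (cs.length : Int) → j - i + 1 ≤ c →
    pvGet2 l i j = lpsP cs i j

-- zero table has the right shape
lemma shape_l0 (n : Nat) :
    ShapeN n ((PySem.List.pyRange 0 (n : Int) 1).map
      (fun _ => (PySem.List.pyRange 0 (n : Int) 1).map (fun _ => (0 : Int)))) := by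
  constructor
  · simp [PySem.List.length_pyRange_one]
  · intro r hr
    simp only [List.mem_map] at hr
    obtain ⟨_, _, rfl⟩ := hr
    simp [PySem.List.length_pyRange_one]

-- diagonal initialisation, iteration by iteration
lemma diag_aux (cs : List Char) (l0 : List (List Int)) (h0 : ShapeN cs.length l0) :
    ∀ m : Nat, (m : Int) ≤ (cs.length : Int) →
    ShapeN cs.length ((PySem.List.pyRange 0 (m : Int) 1).foldl (fun l i => pvSet2 l i i 1) l0) ∧
    ∀ i : Int, 0 ≤ i → i < (m : Int) →
      pvGet2 ((PySem.List.pyRange 0 (m : Int) 1).foldl (fun l i => pvSet2 l i i 1) l0) i i = 1 := by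
  intro m
  induction m with
  | zero =>
    intro _
    rw [PySem.List.pyRange_one_eq_nil (by norm_num)]
    exact ⟨h0, fun i hi him => by norm_num at him; omega⟩
  | succ m ih =>
    intro hm
    push_cast
    push_cast at hm
    obtain ⟨hs, hd⟩ := ih (by omega)
    rw [PySem.List.pyRange_one_succ_right (by omega : (0:Int) ≤ (m:Int)), List.foldl_append,
        List.foldl_cons, List.foldl_nil]
    refine ⟨shape_pvSet2 _ _ _ _ _ hs (by omega) (by omega), ?_⟩
    intro i hi him
    rw [pvGet2_pvSet2 cs.length _ (m:Int) (m:Int) i i 1 hs (by omega) (by omega) (by omega)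
        (by omega) hi (by omega) hi (by omega)]
    by_cases hieq : i = (m:Int)
    · rw [if_pos ⟨hieq, hieq⟩]
    · rw [if_neg (by tauto)]
      exact hd i hi (by omega)

lemma diag_fold (cs : List Char) (l0 : List (List Int)) (h0 : ShapeN cs.length l0) :
    TblOK cs 1
      ((PySem.List.pyRange 0 (cs.length : Int) 1).foldl (fun l i => pvSet2 l i i 1) l0) := by
  obtain ⟨hs, hd⟩ := diag_aux cs l0 h0 cs.length (le_refl _)
  refine ⟨hs, ?_⟩
  intro i j hi hij hjn hlen
  have hij' : i = j := by omega
  subst hij'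
  rw [lpsP_diag]
  exact hd i hi (by omega)

-- one iteration of the inner fill loop, after the cell value has been identified
lemma after_set (cs : List Char) (cl m v : Int) (L : List (List Int))
    (hs : ShapeN cs.length L)
    (hsmall : ∀ i j : Int, 0 ≤ i → i ≤ j → j < (cs.length : Int) → j - i + 1 ≤ cl - 1 →
      pvGet2 L i j = lpsP cs i j)
    (hdone : ∀ i : Int, 0 ≤ i → i < m → pvGet2 L i (i+cl-1) = lpsP cs i (i+cl-1))
    (hcl2 : 2 ≤ cl) (hm : 0 ≤ m) (hmn : m ≤ (cs.length : Int) - cl)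
    (hv : v = lpsP cs m (m+cl-1)) :
    ShapeN cs.length (pvSet2 L m (m+cl-1) v) ∧
    (∀ i j : Int, 0 ≤ i → i ≤ j → j < (cs.length : Int) → j - i + 1 ≤ cl - 1 →
      pvGet2 (pvSet2 L m (m+cl-1) v) i j = lpsP cs i j) ∧
    ∀ i : Int, 0 ≤ i → i < m + 1 →
      pvGet2 (pvSet2 L m (m+cl-1) v) i (i+cl-1) = lpsP cs i (i+cl-1) := by
  have hb : (0:Int) ≤ m + cl - 1 := by omega
  have hbn : m + cl - 1 < (cs.length : Int) := by omega
  refine ⟨shape_pvSet2 _ _ _ _ _ hs hm (by omega), ?_, ?_⟩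
  · intro i j hi hij hjn hlen
    rw [pvGet2_pvSet2 cs.length L m (m+cl-1) i j v hs hm (by omega) hb hbn hi (by omega)
        (by omega) hjn]
    rw [if_neg (by rintro ⟨rfl, rfl⟩; omega)]
    exact hsmall i j hi hij hjn hlen
  · intro i hi him
    rw [pvGet2_pvSet2 cs.length L m (m+cl-1) i (i+cl-1) v hs hm (by omega) hb hbn hi (by omega)
        (by omega) (by omega)]
    by_cases hieq : i = m
    · rw [if_pos ⟨hieq, by omega⟩, hv, hieq]
    · rw [if_neg (by rintro ⟨rfl, -⟩; omega)]
      exact hdone i hi (by omega)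

-- inner loop: fills the entries of length cl left to right
lemma inner_aux (cs : List Char) (cl : Int) (l : List (List Int))
    (hcl2 : 2 ≤ cl) (hcln : cl ≤ (cs.length : Int)) (h : TblOK cs (cl - 1) l) :
    ∀ m : Nat, (m : Int) ≤ (cs.length : Int) - cl + 1 →
    ShapeN cs.length ((PySem.List.pyRange 0 (m : Int) 1).foldl (fun l i =>
        let j := i + cl - 1
        if pvGet1 cs i = pvGet1 cs j ∧ cl = 2 then pvSet2 l i j 2
        else if pvGet1 cs i = pvGet1 cs j then pvSet2 l i j (pvGet2 l (i+1) (j-1) + 2)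
        else pvSet2 l i j (max (pvGet2 l i (j-1)) (pvGet2 l (i+1) j))) l) ∧
    (∀ i j : Int, 0 ≤ i → i ≤ j → j < (cs.length : Int) → j - i + 1 ≤ cl - 1 →
      pvGet2 ((PySem.List.pyRange 0 (m : Int) 1).foldl (fun l i =>
        let j := i + cl - 1
        if pvGet1 cs i = pvGet1 cs j ∧ cl = 2 then pvSet2 l i j 2
        else if pvGet1 cs i = pvGet1 cs j then pvSet2 l i j (pvGet2 l (i+1) (j-1) + 2)
        else pvSet2 l i j (max (pvGet2 l i (j-1)) (pvGet2 l (i+1) j))) l) i j = lpsP cs i j) ∧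
    ∀ i : Int, 0 ≤ i → i < (m : Int) →
      pvGet2 ((PySem.List.pyRange 0 (m : Int) 1).foldl (fun l i =>
        let j := i + cl - 1
        if pvGet1 cs i = pvGet1 cs j ∧ cl = 2 then pvSet2 l i j 2
        else if pvGet1 cs i = pvGet1 cs j then pvSet2 l i j (pvGet2 l (i+1) (j-1) + 2)
        else pvSet2 l i j (max (pvGet2 l i (j-1)) (pvGet2 l (i+1) j))) l) i (i+cl-1)
        = lpsP cs i (i+cl-1) := by
  intro m
  induction m with
  | zero =>
    intro _
    rw [PySem.List.pyRange_one_eq_nil (by norm_num)]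
    exact ⟨h.1, fun i j hi hij hjn hlen => h.2 i j hi hij hjn (by omega),
           fun i hi him => by norm_num at him; omega⟩
  | succ m ih =>
    intro hm
    push_cast
    push_cast at hm
    obtain ⟨hs, hsmall, hdone⟩ := ih (by omega)
    rw [PySem.List.pyRange_one_succ_right (by omega : (0:Int) ≤ (m:Int)), List.foldl_append,
        List.foldl_cons, List.foldl_nil]
    set Lm : List (List Int) := (PySem.List.pyRange 0 (m : Int) 1).foldl (fun l i =>
        let j := i + cl - 1
        if pvGet1 cs i = pvGet1 cs j ∧ cl = 2 then pvSet2 l i j 2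
        else if pvGet1 cs i = pvGet1 cs j then pvSet2 l i j (pvGet2 l (i+1) (j-1) + 2)
        else pvSet2 l i j (max (pvGet2 l i (j-1)) (pvGet2 l (i+1) j))) l with hLm
    have hlt : (m:Int) < (m:Int) + cl - 1 := by omega
    by_cases hc : pvGet1 cs (m:Int) = pvGet1 cs ((m:Int) + cl - 1)
    · by_cases hcl : cl = 2
      · rw [if_pos ⟨hc, hcl⟩]
        have hv : (2:Int) = lpsP cs (m:Int) ((m:Int)+cl-1) := by
          rw [lpsP_lt cs (m:Int) ((m:Int)+cl-1) hlt, if_pos hc, if_pos (by omega)]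
        have hres := after_set cs cl (m:Int) 2 Lm hs hsmall hdone hcl2 (by omega) (by omega) hv
        exact ⟨hres.1, hres.2.1, fun i hi him => hres.2.2 i hi (by omega)⟩
      · rw [if_neg (by tauto), if_pos hc]
        have hread := hsmall ((m:Int)+1) ((m:Int)+cl-1-1) (by omega) (by omega) (by omega) (by omega)
        have hv : pvGet2 Lm ((m:Int)+1) ((m:Int)+cl-1-1) + 2 = lpsP cs (m:Int) ((m:Int)+cl-1) := by
          rw [hread, lpsP_lt cs (m:Int) ((m:Int)+cl-1) hlt, if_pos hc, if_neg (by omega)]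
        have hres := after_set cs cl (m:Int) _ Lm hs hsmall hdone hcl2 (by omega) (by omega) hv
        exact ⟨hres.1, hres.2.1, fun i hi him => hres.2.2 i hi (by omega)⟩
    · rw [if_neg (by tauto), if_neg hc]
      have hr1 := hsmall (m:Int) ((m:Int)+cl-1-1) (by omega) (by omega) (by omega) (by omega)
      have hr2 := hsmall ((m:Int)+1) ((m:Int)+cl-1) (by omega) (by omega) (by omega) (by omega)
      have hv : max (pvGet2 Lm (m:Int) ((m:Int)+cl-1-1)) (pvGet2 Lm ((m:Int)+1) ((m:Int)+cl-1))
          = lpsP cs (m:Int) ((m:Int)+cl-1) := by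
        rw [hr1, hr2, lpsP_lt cs (m:Int) ((m:Int)+cl-1) hlt, if_neg hc]
      have hres := after_set cs cl (m:Int) _ Lm hs hsmall hdone hcl2 (by omega) (by omega) hv
      exact ⟨hres.1, hres.2.1, fun i hi him => hres.2.2 i hi (by omega)⟩

lemma inner_fold (cs : List Char) (cl : Int) (l : List (List Int))
    (hcl2 : 2 ≤ cl) (hcln : cl ≤ (cs.length : Int)) (h : TblOK cs (cl - 1) l) :
    TblOK cs cl
      ((PySem.List.pyRange 0 ((cs.length : Int) - cl + 1) 1).foldl (fun l i =>
        let j := i + cl - 1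
        if pvGet1 cs i = pvGet1 cs j ∧ cl = 2 then pvSet2 l i j 2
        else if pvGet1 cs i = pvGet1 cs j then pvSet2 l i j (pvGet2 l (i+1) (j-1) + 2)
        else pvSet2 l i j (max (pvGet2 l i (j-1)) (pvGet2 l (i+1) j))) l) := by
  have hcast : ((((cs.length : Int) - cl + 1).toNat : Nat) : Int) = (cs.length : Int) - cl + 1 :=
    Int.toNat_of_nonneg (by omega)
  obtain ⟨hs, hsmall, hdone⟩ :=
    inner_aux cs cl l hcl2 hcln h ((cs.length : Int) - cl + 1).toNat (by omega)
  rw [hcast] at hs hsmall hdone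
  refine ⟨hs, ?_⟩
  intro i j hi hij hjn hlen
  by_cases hsm : j - i + 1 ≤ cl - 1
  · exact hsmall i j hi hij hjn hsm
  · have hj : j = i + cl - 1 := by omega
    subst hj
    exact hdone i hi (by omega)

-- outer loop over substring lengths
lemma outer_fold (cs : List Char) (l1 : List (List Int)) (h1 : TblOK cs 1 l1) :
    ∀ (m : Nat), 2 + (m : Int) ≤ (cs.length : Int) + 1 →
    TblOK cs (1 + (m : Int))
      ((PySem.List.pyRange 2 (2 + (m : Int)) 1).foldl (fun l cl =>
        (PySem.List.pyRange 0 ((cs.length : Int) - cl + 1) 1).foldl (fun l i =>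
          let j := i + cl - 1
          if pvGet1 cs i = pvGet1 cs j ∧ cl = 2 then pvSet2 l i j 2
          else if pvGet1 cs i = pvGet1 cs j then pvSet2 l i j (pvGet2 l (i+1) (j-1) + 2)
          else pvSet2 l i j (max (pvGet2 l i (j-1)) (pvGet2 l (i+1) j))) l) l1) := by
  intro m
  induction m with
  | zero =>
    intro _
    rw [PySem.List.pyRange_one_eq_nil (by norm_num)]
    simpa using h1
  | succ m ih =>
    intro hm
    push_cast
    push_cast at hm
    have ihm := ih (by omega)
    rw [show (2:Int) + ((m:Int) + 1) = (2 + (m:Int)) + 1 by ring,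
        PySem.List.pyRange_one_succ_right (by omega : (2:Int) ≤ 2 + (m:Int)), List.foldl_append,
        List.foldl_cons, List.foldl_nil]
    have hpre : TblOK cs ((2 + (m:Int)) - 1) _ :=
      ⟨ihm.1, fun i j hi hij hjn hlen => ihm.2 i j hi hij hjn (by omega)⟩
    have hres := inner_fold cs (2 + (m:Int)) _ (by omega) (by omega) hpre
    exact ⟨hres.1, fun i j hi hij hjn hlen => hres.2 i j hi hij hjn (by omega)⟩

-- ===== VERDICT (by name: the statement is the Claim_ definition above) =====
theorem play_with_words_spec : Claim_equal_play_with_words := by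
  intro s _
  unfold Spec_play_with_words
  simp only [play_with_words, play_with_words_alt]
  rw [foldB_eq s.toList ((s.toList.length : Nat) : Int) _ 0 PySem.Dict.empty
      (memoOK_empty s.toList)]
  apply PySem.List.foldl_congr_mem
  intro acc x hx
  rw [PySem.List.mem_pyRange_one] at hx
  have hn3 : 3 ≤ s.toList.length := by omega
  have hT := outer_fold s.toList _
    (diag_fold s.toList _ (shape_l0 s.toList.length)) (s.toList.length - 1) (by omega)
  rw [show (2:Int) + ((s.toList.length - 1 : Nat) : Int) = ((s.toList.length : Nat) : Int) + 1
      by omega] at hT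
  rw [hT.2 0 x (by omega) (by omega) (by omega) (by omega),
      hT.2 (x+1) (((s.toList.length : Nat) : Int) - 1) (by omega) (by omega) (by omega) (by omega)]
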